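-- pv_equiv track=rewrite | github.com/SonarSource/sonar-python | src/main/resources/org/sonar/plugins/python/pylint/convert.py | grabDescr
-- ===== SOURCE A (Python) =====
-- def grabDescr(lines):
--     def partOfDescr(line):
--         return line[:2] == "  "
--
--     descr = ""
--     while lines:
--         currline = lines.pop()
--         if partOfDescr(currline):
--             descr += currline.strip()
--         else:
--             lines.append(currline)
--             break
--     return descr
-- ===== SOURCE B (Python) =====
-- def grabDescr(lines):
--     # Two-phase: locate the boundary index of the trailing "  "-indented run,
--     # then join the stripped lines in reverse order and truncate the list
--     # (same destructive mutation of `lines` as the original).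
--     i = len(lines)
--     while i > 0 and lines[i - 1][:2] == "  ":
--         i -= 1
--     descr = "".join(lines[j].strip() for j in range(len(lines) - 1, i - 1, -1))
--     del lines[i:]
--     return descr
-- ===== Notes on version B (the rewrite author's own statement) =====
-- stated objective: alternative
-- what changed: Replaces the destructive pop-and-accumulate while loop with a two-phase version: an index scan from the end finds the boundary of the indented run, then a single join over the stripped lines (in reverse) builds the result and one del truncates the list.
import Mathlib
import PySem

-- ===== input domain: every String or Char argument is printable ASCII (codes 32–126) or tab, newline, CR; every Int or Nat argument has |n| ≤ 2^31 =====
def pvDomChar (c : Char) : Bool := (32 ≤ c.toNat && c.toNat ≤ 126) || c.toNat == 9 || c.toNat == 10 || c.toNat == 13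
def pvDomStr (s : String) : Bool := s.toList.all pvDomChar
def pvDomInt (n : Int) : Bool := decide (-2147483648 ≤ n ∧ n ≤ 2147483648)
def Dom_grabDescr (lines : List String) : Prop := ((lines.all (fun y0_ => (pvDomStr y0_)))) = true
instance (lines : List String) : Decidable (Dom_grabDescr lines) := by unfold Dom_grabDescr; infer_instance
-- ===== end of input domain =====

-- B replaces A's destructive pop-and-accumulate loop by boundary-scan + join of stripped lines
-- (return-value equivalence; both Pythons truncate `lines` identically in place).


-- ===== PORT A =====
-- partOfDescr(line): line[:2] == "  "
def partOfDescr (line : String) : Bool :=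
  PySem.Str.slice line none (some 2) == "  "

-- the while loop: pop the last element (= head of the reversed list); on a match
-- accumulate its strip into descr and continue, otherwise break with descr.
def grabLoop : List String → String → String
  | [], descr => descr
  | currline :: rest, descr =>
    if partOfDescr currline then grabLoop rest (descr ++ PySem.Str.strip currline)
    else descr

def grabDescr (lines : List String) : String :=
  grabLoop lines.reverse ""

-- ===== PORT B =====
-- boundary scan from the end = takeWhile over the reversed list; then one join.
def grabDescr_alt (lines : List String) : String :=
  String.join ((lines.reverse.takeWhile partOfDescr).map PySem.Str.strip)

-- ===== PRECONDITION & SPEC =====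
def Spec_grabDescr (lines : List String) (out : String) : Prop := out = grabDescr_alt lines
instance (lines : List String) (out : String) : Decidable (Spec_grabDescr lines out) := by unfold Spec_grabDescr; infer_instance

-- ===== CLAIM (what is proved, stated in full; the proofs are below) =====
def Claim_equal_grabDescr : Prop := ∀ (lines : List String), Dom_grabDescr lines → Spec_grabDescr lines (grabDescr lines)

-- ===== LEMMAS AND PROOFS =====
theorem foldl_append_str (l : List String) (s : String) :
    l.foldl (· ++ ·) s = s ++ l.foldl (· ++ ·) "" := by
  induction l generalizing s with
  | nil => simp
  | cons a l ih =>
    simp only [List.foldl_cons]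
    rw [ih (s ++ a), ih ("" ++ a)]
    simp [String.append_assoc]

theorem join_cons (a : String) (l : List String) :
    String.join (a :: l) = a ++ String.join l := by
  simp only [String.join, List.foldl_cons]
  rw [foldl_append_str]
  simp

theorem grabLoop_eq (xs : List String) (d : String) :
    grabLoop xs d = d ++ String.join ((xs.takeWhile partOfDescr).map PySem.Str.strip) := by
  induction xs generalizing d with
  | nil => simp [grabLoop, String.join]
  | cons c rest ih =>
    by_cases h : partOfDescr c
    · simp [grabLoop, h, ih, join_cons, String.append_assoc]
    · simp [grabLoop, h, String.join]

-- ===== VERDICT (by name: the statement is the Claim_ definition above) =====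
theorem grabDescr_spec : Claim_equal_grabDescr := by
  intro lines _
  show grabDescr lines = grabDescr_alt lines
  unfold grabDescr grabDescr_alt
  rw [grabLoop_eq]
  simp
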